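-- pv_equiv track=rewrite | github.com/trbarron/set_ocr | main.py | determine_num_from_loc
-- ===== SOURCE A (Python) =====
-- def determine_num_from_loc(loc):
--     num_vote = [0, 0, 0]
--
--     for pt in zip(*loc[::-1]):
--         if pt[1] < 10:
--             if pt[0] >= 2 and pt[0] <= 14:
--                 num_vote[2] += 1
--             if pt[0] >= 65 and pt[0] <= 73:
--                 num_vote[0] += 1
--             if pt[0] >= 120 and pt[0] <= 140:
--                 num_vote[2] += 1
--             if pt[0] >= 30 and pt[0] <= 49:
--                 num_vote[1] += 1
--             if pt[0] >= 89 and pt[0] <= 108: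
--                 num_vote[1] += 1
--
--     num_winner = num_vote.index(max(num_vote))
--     return num_winner,sum(num_vote)
-- ===== SOURCE B (Python) =====
-- def determine_num_from_loc(loc):
--     # Keep only the points below the y<10 line, then count each class with its own scan.
--     pts = [pt for pt in zip(*loc[::-1]) if pt[1] < 10]
--     c0 = sum(1 for pt in pts if 65 <= pt[0] <= 73)
--     c1 = sum(1 for pt in pts if 30 <= pt[0] <= 49 or 89 <= pt[0] <= 108)
--     c2 = sum(1 for pt in pts if 2 <= pt[0] <= 14 or 120 <= pt[0] <= 140)
--     m = max(c0, c1, c2)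
--     winner = 0 if c0 == m else (1 if c1 == m else 2)
--     return winner, c0 + c1 + c2
-- ===== Notes on version B (the rewrite author's own statement) =====
-- stated objective: alternative
-- what changed: Replaces A's single accumulating pass with an if-chain mutating a 3-slot vote list by a y<10 filter followed by one independent counting scan per class (exploiting that the five x-ranges are disjoint), with an explicit max/compare winner selection.
import Mathlib
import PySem

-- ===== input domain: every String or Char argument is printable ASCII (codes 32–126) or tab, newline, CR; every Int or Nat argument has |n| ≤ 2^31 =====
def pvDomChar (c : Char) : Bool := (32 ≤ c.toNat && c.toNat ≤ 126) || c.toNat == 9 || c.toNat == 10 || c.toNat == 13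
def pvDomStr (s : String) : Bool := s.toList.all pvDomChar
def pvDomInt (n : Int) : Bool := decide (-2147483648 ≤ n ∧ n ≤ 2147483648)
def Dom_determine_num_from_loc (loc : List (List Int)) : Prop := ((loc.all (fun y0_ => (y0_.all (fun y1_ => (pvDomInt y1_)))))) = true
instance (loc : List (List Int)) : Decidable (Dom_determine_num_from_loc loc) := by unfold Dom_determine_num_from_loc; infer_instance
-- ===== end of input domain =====

-- B replaces A's single accumulating pass with a y<10 filter followed by one counting scan per class (objective: simpler/alternative decomposition, same cost).

-- ===== PORT A =====
-- shared helper: Python's zip(*rows) — columns of the rows, truncated to the shortest row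
def pyZipCols (rows : List (List Int)) : Nat → List (List Int)
  | 0 => []
  | n + 1 => (rows.map (fun r => r.headD 0)) :: pyZipCols (rows.map List.tail) n

def pyZipStar (rows : List (List Int)) : List (List Int) :=
  pyZipCols rows (((rows.map List.length).min?).getD 0)

-- the body of A's for-loop: pt[1] / pt[0] via pyGet?; on inputs where Python would
-- raise IndexError (excluded by Pre_) the .getD 0 default is never reached inside Pre_
def voteBody (nv : Int × Int × Int) (x y : Int) : Int × Int × Int :=
  if y < 10 then
    let nv := if 2 ≤ x ∧ x ≤ 14 then (nv.1, nv.2.1, nv.2.2 + 1) else nv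
    let nv := if 65 ≤ x ∧ x ≤ 73 then (nv.1 + 1, nv.2.1, nv.2.2) else nv
    let nv := if 120 ≤ x ∧ x ≤ 140 then (nv.1, nv.2.1, nv.2.2 + 1) else nv
    let nv := if 30 ≤ x ∧ x ≤ 49 then (nv.1, nv.2.1 + 1, nv.2.2) else nv
    let nv := if 89 ≤ x ∧ x ≤ 108 then (nv.1, nv.2.1 + 1, nv.2.2) else nv
    nv
  else nv

def voteStep (nv : Int × Int × Int) (pt : List Int) : Int × Int × Int :=
  voteBody nv ((PySem.List.pyGet? pt 0).getD 0) ((PySem.List.pyGet? pt 1).getD 0)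

def determine_num_from_loc (loc : List (List Int)) : Int × Int :=
  let nv := (pyZipStar loc.reverse).foldl voteStep (0, 0, 0)
  -- num_vote.index(max(num_vote))
  let m := max (max nv.1 nv.2.1) nv.2.2
  let winner : Int := if nv.1 = m then 0 else if nv.2.1 = m then 1 else 2
  (winner, nv.1 + nv.2.1 + nv.2.2)

-- ===== PORT B =====
def determine_num_from_loc_alt (loc : List (List Int)) : Int × Int :=
  let pts := (pyZipStar loc.reverse).filter (fun pt => (PySem.List.pyGet? pt 1).getD 0 < 10)
  let c0 : Int := pts.countP (fun pt => decide (65 ≤ (PySem.List.pyGet? pt 0).getD 0 ∧ (PySem.List.pyGet? pt 0).getD 0 ≤ 73))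
  let c1 : Int := pts.countP (fun pt => decide ((30 ≤ (PySem.List.pyGet? pt 0).getD 0 ∧ (PySem.List.pyGet? pt 0).getD 0 ≤ 49) ∨ (89 ≤ (PySem.List.pyGet? pt 0).getD 0 ∧ (PySem.List.pyGet? pt 0).getD 0 ≤ 108)))
  let c2 : Int := pts.countP (fun pt => decide ((2 ≤ (PySem.List.pyGet? pt 0).getD 0 ∧ (PySem.List.pyGet? pt 0).getD 0 ≤ 14) ∨ (120 ≤ (PySem.List.pyGet? pt 0).getD 0 ∧ (PySem.List.pyGet? pt 0).getD 0 ≤ 140)))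
  let m := max (max c0 c1) c2
  let winner : Int := if c0 = m then 0 else if c1 = m then 1 else 2
  (winner, c0 + c1 + c2)

-- ===== PRECONDITION & SPEC =====
-- Pre_ excludes exactly the inputs where Python A raises IndexError (pt[1] on a
-- single-row loc with a nonempty row); everywhere else A returns normally.
def Pre_determine_num_from_loc (loc : List (List Int)) : Prop := loc.length = 1 → loc = [[]]
instance (loc : List (List Int)) : Decidable (Pre_determine_num_from_loc loc) := by unfold Pre_determine_num_from_loc; infer_instance
def pvWitness_determine_num_from_loc : List (List Int) := [[1, 2], [66, 130]]

def Spec_determine_num_from_loc (loc : List (List Int)) (out : Int × Int) : Prop := out = determine_num_from_loc_alt loc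
instance (loc : List (List Int)) (out : Int × Int) : Decidable (Spec_determine_num_from_loc loc out) := by unfold Spec_determine_num_from_loc; infer_instance

-- ===== CLAIM (what is proved, stated in full; the proofs are below) =====
def Claim_equal_determine_num_from_loc : Prop := ∀ (loc : List (List Int)), Dom_determine_num_from_loc loc → Pre_determine_num_from_loc loc → Spec_determine_num_from_loc loc (determine_num_from_loc loc)

-- ===== LEMMAS AND PROOFS =====

set_option maxHeartbeats 2000000 in
-- one step of A's fold, written as three independent increments (ranges are disjoint)
lemma voteBody_eq (a b c x y : Int) :
    voteBody (a, b, c) x y =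
      (a + (if y < 10 ∧ (65 ≤ x ∧ x ≤ 73) then (1 : Int) else 0),
       b + (if y < 10 ∧ ((30 ≤ x ∧ x ≤ 49) ∨ (89 ≤ x ∧ x ≤ 108)) then (1 : Int) else 0),
       c + (if y < 10 ∧ ((2 ≤ x ∧ x ≤ 14) ∨ (120 ≤ x ∧ x ≤ 140)) then (1 : Int) else 0)) := by
  unfold voteBody
  split_ifs <;> simp_all <;> omega

set_option maxHeartbeats 2000000 in
-- A's fold equals the three per-class counts over the y<10 filtered points
lemma fold_vote_eq (pts : List (List Int)) (a b c : Int) :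
    pts.foldl voteStep (a, b, c) =
      (a + ((pts.filter (fun pt => (PySem.List.pyGet? pt 1).getD 0 < 10)).countP (fun pt => decide (65 ≤ (PySem.List.pyGet? pt 0).getD 0 ∧ (PySem.List.pyGet? pt 0).getD 0 ≤ 73)) : Nat),
       b + ((pts.filter (fun pt => (PySem.List.pyGet? pt 1).getD 0 < 10)).countP (fun pt => decide ((30 ≤ (PySem.List.pyGet? pt 0).getD 0 ∧ (PySem.List.pyGet? pt 0).getD 0 ≤ 49) ∨ (89 ≤ (PySem.List.pyGet? pt 0).getD 0 ∧ (PySem.List.pyGet? pt 0).getD 0 ≤ 108))) : Nat),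
       c + ((pts.filter (fun pt => (PySem.List.pyGet? pt 1).getD 0 < 10)).countP (fun pt => decide ((2 ≤ (PySem.List.pyGet? pt 0).getD 0 ∧ (PySem.List.pyGet? pt 0).getD 0 ≤ 14) ∨ (120 ≤ (PySem.List.pyGet? pt 0).getD 0 ∧ (PySem.List.pyGet? pt 0).getD 0 ≤ 140))) : Nat)) := by
  induction pts generalizing a b c with
  | nil => simp
  | cons pt rest ih =>
    simp only [List.foldl_cons, voteStep, voteBody_eq, ih, List.filter_cons]
    by_cases hy : (PySem.List.pyGet? pt 1).getD 0 < 10 <;>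
      simp only [hy, if_pos, if_neg, List.countP_cons, decide_eq_true_eq, not_false_iff,
        Prod.mk.injEq, true_and, false_and, if_neg, not_false_iff] <;>
      (try split_ifs) <;> push_cast <;> omega

-- ===== VERDICT (by name: the statement is the Claim_ definition above) =====
theorem determine_num_from_loc_spec : Claim_equal_determine_num_from_loc := by
  intro loc _ _
  unfold Spec_determine_num_from_loc determine_num_from_loc determine_num_from_loc_alt
  simp only [fold_vote_eq, zero_add]
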